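-- pv_equiv track=rewrite | github.com/oliveira-caio/motorlab | motorlab/plot.py | _create_color_scheme
-- ===== SOURCE A (Python) =====
-- def _create_color_scheme(
--     color_scheme: str,
--     skeleton: list,
-- ) -> list:
--     """Create color schemes for bones and joints for plotly."""
--     if color_scheme == "body_parts":
--         bone_colors = []
--         for i in range(len(skeleton)):
--             if i < len(skeleton) // 3:
--                 bone_colors.append("red")  # Upper body
--             elif i < 2 * len(skeleton) // 3:
--                 bone_colors.append("green")  # Middle body
--             else:
--                 bone_colors.append("blue")  # Lower body
--     else:
--         bone_colors = ["blue"] * len(skeleton)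
--
--     return bone_colors
-- ===== SOURCE B (Python) =====
-- def _create_color_scheme(
--     color_scheme: str,
--     skeleton: list,
-- ) -> list:
--     """Create color schemes for bones and joints for plotly."""
--     n = len(skeleton)
--     if color_scheme != "body_parts":
--         return ["blue"] * n
--     t1 = n // 3
--     t2 = 2 * n // 3
--     return ["red"] * t1 + ["green"] * (t2 - t1) + ["blue"] * (n - t2)
-- ===== Notes on version B (the rewrite author's own statement) =====
-- stated objective: simpler
-- what changed: Replaces the per-index classifying loop with direct computation of the two segment lengths and concatenation of three homogeneous runs ['red']*t1 + ['green']*(t2-t1) + ['blue']*(n-t2).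
import Mathlib
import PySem

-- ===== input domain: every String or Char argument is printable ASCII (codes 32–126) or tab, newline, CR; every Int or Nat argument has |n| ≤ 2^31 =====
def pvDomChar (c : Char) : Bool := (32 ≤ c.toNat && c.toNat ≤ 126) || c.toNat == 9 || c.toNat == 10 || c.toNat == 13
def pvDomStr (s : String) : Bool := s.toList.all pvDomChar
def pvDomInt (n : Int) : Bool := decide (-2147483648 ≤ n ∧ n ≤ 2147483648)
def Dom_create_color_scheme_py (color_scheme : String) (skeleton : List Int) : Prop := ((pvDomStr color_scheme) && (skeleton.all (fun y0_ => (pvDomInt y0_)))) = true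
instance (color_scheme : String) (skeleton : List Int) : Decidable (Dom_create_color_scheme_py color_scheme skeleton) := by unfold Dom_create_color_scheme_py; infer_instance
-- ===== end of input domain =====

-- B builds the three homogeneous color runs directly from the segment lengths instead of classifying each index in a loop (objective: simpler).

-- ===== PORT A =====
-- A: loop over range(len(skeleton)), appending a color per index by comparing it with the thirds.
def create_color_scheme_py (color_scheme : String) (skeleton : List Int) : List String :=
  if color_scheme == "body_parts" then
    (List.range skeleton.length).foldl
      (fun bone_colors i =>
        if i < skeleton.length / 3 then bone_colors ++ ["red"]
        else if i < 2 * skeleton.length / 3 then bone_colors ++ ["green"]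
        else bone_colors ++ ["blue"]) []
  else
    List.replicate skeleton.length "blue"

-- ===== PORT B =====
-- B: compute thresholds t1, t2 and concatenate three replicated runs.
def create_color_scheme_py_alt (color_scheme : String) (skeleton : List Int) : List String :=
  let n := skeleton.length
  if color_scheme ≠ "body_parts" then
    List.replicate n "blue"
  else
    let t1 := n / 3
    let t2 := 2 * n / 3
    List.replicate t1 "red" ++ List.replicate (t2 - t1) "green" ++ List.replicate (n - t2) "blue"

-- ===== PRECONDITION & SPEC =====
def Spec_create_color_scheme_py (color_scheme : String) (skeleton : List Int) (out : List String) : Prop := out = create_color_scheme_py_alt color_scheme skeleton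
instance (color_scheme : String) (skeleton : List Int) (out : List String) : Decidable (Spec_create_color_scheme_py color_scheme skeleton out) := by unfold Spec_create_color_scheme_py; infer_instance

-- ===== CLAIM (what is proved, stated in full; the proofs are below) =====
def Claim_equal_create_color_scheme_py : Prop := ∀ (color_scheme : String) (skeleton : List Int), Dom_create_color_scheme_py color_scheme skeleton → Spec_create_color_scheme_py color_scheme skeleton (create_color_scheme_py color_scheme skeleton)

-- ===== LEMMAS AND PROOFS =====

-- The classifying fold is the map of the classifier over the index range.
lemma pv_foldl_append_map {α β : Type} (f : α → β) (l : List α) (acc : List β) :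
    l.foldl (fun a i => a ++ [f i]) acc = acc ++ l.map f := by
  induction l generalizing acc with
  | nil => simp
  | cons x xs ih => simp [List.foldl, ih]

-- Mapping the three-way index classifier over range n yields the three runs.
lemma pv_seg (a b n : ℕ) (h1 : a ≤ b) (h2 : b ≤ n) (x y z : String) :
    (List.range n).map (fun i => if i < a then x else if i < b then y else z)
      = List.replicate a x ++ List.replicate (b - a) y ++ List.replicate (n - b) z := by
  have hsplit : List.range n = List.range' 0 a ++ List.range' a (b - a) ++ List.range' b (n - b) := by
    have e1 := @List.range'_append 0 a (b - a) 1
    have e2 := @List.range'_append 0 b (n - b) 1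
    simp only [Nat.zero_add, Nat.one_mul] at e1 e2
    rw [Nat.add_sub_cancel' h1] at e1
    rw [Nat.add_sub_cancel' h2] at e2
    rw [List.range_eq_range', e1, e2]
  rw [hsplit, List.map_append, List.map_append]
  congr 1
  · congr 1
    · apply List.eq_replicate_iff.mpr
      refine ⟨by simp, ?_⟩
      intro c hc
      simp only [List.mem_map, List.mem_range'_1] at hc
      obtain ⟨i, hi, rfl⟩ := hc
      simp only [if_pos (by omega : i < a)]
    · apply List.eq_replicate_iff.mpr
      refine ⟨by simp, ?_⟩
      intro c hc
      simp only [List.mem_map, List.mem_range'_1] at hc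
      obtain ⟨i, hi, rfl⟩ := hc
      rw [if_neg (by omega), if_pos (by omega)]
  · apply List.eq_replicate_iff.mpr
    refine ⟨by simp, ?_⟩
    intro c hc
    simp only [List.mem_map, List.mem_range'_1] at hc
    obtain ⟨i, hi, rfl⟩ := hc
    rw [if_neg (by omega), if_neg (by omega)]

-- ===== VERDICT (by name: the statement is the Claim_ definition above) =====
theorem create_color_scheme_py_spec : Claim_equal_create_color_scheme_py := by
  intro color_scheme skeleton _
  unfold Spec_create_color_scheme_py create_color_scheme_py create_color_scheme_py_alt
  by_cases h : color_scheme = "body_parts"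
  · simp only [h, beq_self_eq_true, if_true, ne_eq, not_true_eq_false]
    have hfun : (fun (bone_colors : List String) (i : ℕ) =>
        if i < skeleton.length / 3 then bone_colors ++ ["red"]
        else if i < 2 * skeleton.length / 3 then bone_colors ++ ["green"]
        else bone_colors ++ ["blue"])
      = (fun bone_colors i => bone_colors ++
          [if i < skeleton.length / 3 then "red"
           else if i < 2 * skeleton.length / 3 then "green" else "blue"]) := by
      funext bc i; split_ifs <;> rfl
    rw [hfun, pv_foldl_append_map, pv_seg (skeleton.length / 3) (2 * skeleton.length / 3)
      skeleton.length (by omega) (by omega)]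
    simp
  · simp [h]
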